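-- pv_equiv track=rewrite | github.com/jameskermode/f90wrap | f90wrap/parser.py | remove_delimited
-- ===== SOURCE A (Python) =====
-- def remove_delimited(line, d1, d2):
--     bk = 0
--     temp_str = ''
--     undel_str = ''
--     delimited = []
--
--     for i in range(len(line)):
--         if bk == 1:
--             if line[i] == d2:
--                 bk = 0
--                 delimited.append(temp_str[:])
--                 temp_str = ''
--                 undel_str = undel_str + line[i]
--                 continue
--             temp_str = temp_str + line[i]
--             continue
--         if line[i] == d1:
--             bk = 1
--         undel_str = undel_str + line[i]
--
--     if bk == 1:
--         undel_str = undel_str + temp_str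
--
--     return delimited, undel_str
-- ===== SOURCE B (Python) =====
-- def remove_delimited(line, d1, d2):
--     # Delimiters act only as single characters in the original (it compares
--     # line[i] == d1 per character), so non-single-char delimiters never match.
--     if len(d1) != 1 or len(d2) != 1:
--         return [], line
--     delimited = []
--     undel = []
--     rest = line
--     while True:
--         i = rest.find(d1)
--         if i == -1:
--             undel.append(rest)
--             break
--         undel.append(rest[:i + 1])
--         j = rest.find(d2, i + 1)
--         if j == -1:
--             undel.append(rest[i + 1:])
--             break
--         delimited.append(rest[i + 1:j])
--         undel.append(d2)
--         rest = rest[j + 1:]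
--     return delimited, ''.join(undel)
-- ===== Notes on version B (the rewrite author's own statement) =====
-- stated objective: idiomatic
-- what changed: Replaces the per-character state-flag scan with str.find-based index jumping over the remaining string, collecting undelimited slices in a list joined once at the end, with an upfront guard since only single-character delimiters can ever match.
import Mathlib
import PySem

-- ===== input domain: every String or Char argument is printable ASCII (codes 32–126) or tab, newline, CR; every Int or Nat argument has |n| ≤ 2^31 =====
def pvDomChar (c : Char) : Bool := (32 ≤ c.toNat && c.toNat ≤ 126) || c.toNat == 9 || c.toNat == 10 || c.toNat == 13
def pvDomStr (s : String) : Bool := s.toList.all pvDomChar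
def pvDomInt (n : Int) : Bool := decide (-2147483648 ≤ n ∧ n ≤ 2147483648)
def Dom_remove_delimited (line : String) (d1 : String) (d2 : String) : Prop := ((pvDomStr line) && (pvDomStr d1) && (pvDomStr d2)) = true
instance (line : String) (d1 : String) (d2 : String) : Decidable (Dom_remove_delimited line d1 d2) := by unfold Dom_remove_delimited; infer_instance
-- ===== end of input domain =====

-- B replaces A's per-character state-flag scan by find-based index jumping over the
-- remaining string (idiomatic; only single-character delimiters can match, as in A).

-- ===== PORT A =====
-- one step of A's for-loop; state = (bk, temp_str, undel_str, delimited), strings as List Char.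
-- Python's `line[i] == d1` compares the 1-char slice with the string d1 ⇒ `[c] = d1.toList`.
def pvStepA (d1 d2 : List Char) (s : Nat × List Char × List Char × List String) (c : Char) :
    Nat × List Char × List Char × List String :=
  match s with
  | (bk, temp, undel, delim) =>
    if bk = 1 then
      if [c] = d2 then (0, [], undel ++ [c], delim ++ [String.ofList temp])
      else (1, temp ++ [c], undel, delim)
    else
      if [c] = d1 then (1, temp, undel ++ [c], delim)
      else (bk, temp, undel ++ [c], delim)

def remove_delimited (line : String) (d1 : String) (d2 : String) : List String × String :=
  let s := line.toList.foldl (pvStepA d1.toList d2.toList) (0, [], [], [])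
  (s.2.2.2, String.ofList (if s.1 = 1 then s.2.2.1 ++ s.2.1 else s.2.2.1))

-- ===== PORT B =====
-- B's while-loop over the remaining string; d1/d2 are the single characters a/b
-- (guard in remove_delimited_alt), so Python's `rest.find(d1)` is the first index of a,
-- ported as `List.findIdx? (· == a)` (exact for a 1-character needle).
def pvLoopB (a b : Char) (l : List Char) : List String × List Char :=
  match h : l.findIdx? (· == a) with
  | none => ([], l)                                   -- undel.append(rest); break
  | some i =>
    match (l.drop (i+1)).findIdx? (· == b) with
    | none => ([], l.take (i+1) ++ l.drop (i+1))      -- undel += rest[:i+1], rest[i+1:]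
    | some k =>                                       -- collect rest[i+1:j]; rest = rest[j+1:]
      (String.ofList ((l.drop (i+1)).take k) :: (pvLoopB a b ((l.drop (i+1)).drop (k+1))).1,
       l.take (i+1) ++ b :: (pvLoopB a b ((l.drop (i+1)).drop (k+1))).2)
  termination_by l.length
  decreasing_by
    all_goals
      obtain ⟨hi, -⟩ := List.findIdx?_eq_some_iff_getElem.mp h
      simp [List.length_drop]
      omega

def remove_delimited_alt (line : String) (d1 : String) (d2 : String) : List String × String :=
  match d1.toList, d2.toList with
  | [a], [b] =>
    let r := pvLoopB a b line.toList
    (r.1, String.ofList r.2)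
  | _, _ => ([], line)                                -- len(d1) != 1 or len(d2) != 1

-- ===== PRECONDITION & SPEC =====
def Spec_remove_delimited (line : String) (d1 : String) (d2 : String) (out : List String × String) : Prop := out = remove_delimited_alt line d1 d2
instance (line : String) (d1 : String) (d2 : String) (out : List String × String) : Decidable (Spec_remove_delimited line d1 d2 out) := by unfold Spec_remove_delimited; infer_instance

-- ===== CLAIM (what is proved, stated in full; the proofs are below) =====
def Claim_equal_remove_delimited : Prop := ∀ (line : String) (d1 : String) (d2 : String), Dom_remove_delimited line d1 d2 → Spec_remove_delimited line d1 d2 (remove_delimited line d1 d2)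

-- ===== LEMMAS AND PROOFS =====

-- the final pairing A performs after its loop, kept as char lists
def pvFinishA (s : Nat × List Char × List Char × List String) : List String × List Char :=
  (s.2.2.2, if s.1 = 1 then s.2.2.1 ++ s.2.1 else s.2.2.1)

-- single steps of A's machine
lemma pvStepA_open_miss (d1 d2 : List Char) (c : Char) (hc : ¬ ([c] = d1)) (temp u ds) :
    pvStepA d1 d2 (0, temp, u, ds) c = (0, temp, u ++ [c], ds) := by
  simp [pvStepA, hc]

lemma pvStepA_open_hit (d1 d2 : List Char) (c : Char) (hc : [c] = d1) (temp u ds) :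
    pvStepA d1 d2 (0, temp, u, ds) c = (1, temp, u ++ [c], ds) := by
  simp [pvStepA, hc]

lemma pvStepA_closed_miss (d1 d2 : List Char) (c : Char) (hc : ¬ ([c] = d2)) (temp u ds) :
    pvStepA d1 d2 (1, temp, u, ds) c = (1, temp ++ [c], u, ds) := by
  simp [pvStepA, hc]

lemma pvStepA_closed_hit (d1 d2 : List Char) (c : Char) (hc : [c] = d2) (temp u ds) :
    pvStepA d1 d2 (1, temp, u, ds) c = (0, [], u ++ [c], ds ++ [String.ofList temp]) := by
  simp [pvStepA, hc]

-- A's loop in state bk=0 over a stretch with no d1-match only copies chars to undel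
lemma pvNoMatch0 (d1 d2 : List Char) (t : List Char) (h : ∀ c ∈ t, ¬ ([c] = d1)) :
    ∀ temp u ds, t.foldl (pvStepA d1 d2) (0, temp, u, ds) = (0, temp, u ++ t, ds) := by
  induction t with
  | nil => intro temp u ds; simp [List.foldl]
  | cons c t ih =>
    intro temp u ds
    rw [List.foldl_cons, pvStepA_open_miss d1 d2 c (h c (by simp)) temp u ds,
      ih (fun x hx => h x (by simp [hx]))]
    simp

-- A's loop in state bk=1 over a stretch with no d2-match only copies chars to temp
lemma pvNoMatch1 (d1 d2 : List Char) (t : List Char) (h : ∀ c ∈ t, ¬ ([c] = d2)) :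
    ∀ temp u ds, t.foldl (pvStepA d1 d2) (1, temp, u, ds) = (1, temp ++ t, u, ds) := by
  induction t with
  | nil => intro temp u ds; simp [List.foldl]
  | cons c t ih =>
    intro temp u ds
    rw [List.foldl_cons, pvStepA_closed_miss d1 d2 c (h c (by simp)) temp u ds,
      ih (fun x hx => h x (by simp [hx]))]
    simp

-- if no character can ever equal d2, everything after the first d1 ends in temp and is
-- re-appended by the epilogue: A returns all of the input as undel_str
lemma pvNoD2 (d1 d2 : List Char) (hd2 : ∀ c : Char, ¬ ([c] = d2)) :
    ∀ (l u : List Char) (ds : List String),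
      pvFinishA (l.foldl (pvStepA d1 d2) (0, [], u, ds)) = (ds, u ++ l) := by
  intro l
  induction l with
  | nil => intro u ds; simp [List.foldl, pvFinishA]
  | cons c t ih =>
    intro u ds
    by_cases hc : [c] = d1
    · rw [List.foldl_cons, pvStepA_open_hit d1 d2 c hc [] u ds,
        pvNoMatch1 d1 d2 t (fun x _ => hd2 x)]
      simp [pvFinishA]
    · rw [List.foldl_cons, pvStepA_open_miss d1 d2 c hc [] u ds, ih]
      simp

-- decomposition of a successful findIdx? search for a single character
lemma pvFindSplit (l : List Char) (a : Char) (i : Nat) (h : l.findIdx? (· == a) = some i) :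
    i < l.length ∧ l = l.take i ++ a :: l.drop (i+1) ∧ (∀ c ∈ l.take i, c ≠ a)
      ∧ l.take (i+1) = l.take i ++ [a] := by
  obtain ⟨hi, hgi, hlt⟩ := List.findIdx?_eq_some_iff_getElem.mp h
  simp only [beq_iff_eq] at hgi
  refine ⟨hi, ?_, ?_, ?_⟩
  · have hsplit := List.take_append_drop i l
    rw [List.drop_eq_getElem_cons hi, hgi] at hsplit
    exact hsplit.symm
  · intro c hc
    obtain ⟨j, hj, rfl⟩ := List.mem_iff_getElem.mp hc
    have hlen : (l.take i).length = min i l.length := List.length_take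
    have hjl : j < i := by omega
    have hp := hlt j hjl
    simp only [beq_iff_eq] at hp
    simpa [List.getElem_take] using hp
  · rw [List.take_add_one]
    simp [List.getElem?_eq_getElem hi, hgi]

-- unfolding equations for pvLoopB's three branches
lemma pvLoopB_none (a b : Char) (l : List Char) (h : l.findIdx? (· == a) = none) :
    pvLoopB a b l = ([], l) := by
  conv_lhs => rw [pvLoopB.eq_def]
  split
  · rfl
  · rename_i heq; rw [h] at heq; cases heq

lemma pvLoopB_some_none (a b : Char) (l : List Char) (i : Nat)
    (h1 : l.findIdx? (· == a) = some i) (h2 : (l.drop (i+1)).findIdx? (· == b) = none) :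
    pvLoopB a b l = ([], l.take (i+1) ++ l.drop (i+1)) := by
  conv_lhs => rw [pvLoopB.eq_def]
  split
  · rename_i heq; rw [h1] at heq; cases heq
  · rename_i i' heq
    rw [h1] at heq; cases heq
    rw [h2]

lemma pvLoopB_some_some (a b : Char) (l : List Char) (i k : Nat)
    (h1 : l.findIdx? (· == a) = some i) (h2 : (l.drop (i+1)).findIdx? (· == b) = some k) :
    pvLoopB a b l =
      (String.ofList ((l.drop (i+1)).take k) :: (pvLoopB a b ((l.drop (i+1)).drop (k+1))).1,
       l.take (i+1) ++ b :: (pvLoopB a b ((l.drop (i+1)).drop (k+1))).2) := by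
  conv_lhs => rw [pvLoopB.eq_def]
  split
  · rename_i heq; rw [h1] at heq; cases heq
  · rename_i i' heq
    rw [h1] at heq; cases heq
    rw [h2]

-- core correspondence: A's machine run from a fresh open state computes B's jumping loop
lemma pvMainAux (a b : Char) : ∀ (n : Nat) (l : List Char), l.length ≤ n →
    ∀ (u : List Char) (ds : List String),
      pvFinishA (l.foldl (pvStepA [a] [b]) (0, [], u, ds)) =
        (ds ++ (pvLoopB a b l).1, u ++ (pvLoopB a b l).2) := by
  intro n
  induction n with
  | zero =>
    intro l hl u ds
    have : l = [] := List.length_eq_zero_iff.mp (Nat.le_zero.mp hl)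
    subst this
    rw [pvLoopB_none a b [] (by simp)]
    simp [List.foldl, pvFinishA]
  | succ n ih =>
    intro l hl u ds
    rcases hfa : l.findIdx? (· == a) with _ | i
    · -- no d1 in the rest: copy everything to undel
      have hall : ∀ c ∈ l, ¬ ([c] = [a]) := by
        intro c hc
        have := List.findIdx?_eq_none_iff.mp hfa c hc
        simp only [beq_eq_false_iff_ne, ne_eq] at this
        simp [this]
      rw [pvNoMatch0 _ _ l hall, pvLoopB_none a b l hfa]
      simp [pvFinishA]
    · obtain ⟨hi, hdec, htk, htk1⟩ := pvFindSplit l a i hfa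
      have hall0 : ∀ c ∈ l.take i, ¬ ([c] = [a]) := by
        intro c hc; simpa using htk c hc
      conv_lhs => rw [hdec]
      rw [List.foldl_append, pvNoMatch0 _ _ _ hall0, List.foldl_cons,
        pvStepA_open_hit [a] [b] a rfl _ _ _]
      rcases hfb : (l.drop (i+1)).findIdx? (· == b) with _ | k
      · -- unterminated region: temp re-appended at the end
        have hall1 : ∀ c ∈ l.drop (i+1), ¬ ([c] = [b]) := by
          intro c hc
          have := List.findIdx?_eq_none_iff.mp hfb c hc
          simp only [beq_eq_false_iff_ne, ne_eq] at this
          simp [this]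
        rw [pvNoMatch1 _ _ _ hall1, pvLoopB_some_none a b l i hfa hfb]
        simp [pvFinishA, htk1]
      · -- closed region: delimited part collected, loop continues after it
        obtain ⟨hk, hdec2, htk2, htk21⟩ := pvFindSplit (l.drop (i+1)) b k hfb
        have hall1 : ∀ c ∈ (l.drop (i+1)).take k, ¬ ([c] = [b]) := by
          intro c hc; simpa using htk2 c hc
        conv_lhs => rw [hdec2]
        rw [List.foldl_append, pvNoMatch1 _ _ _ hall1, List.foldl_cons,
          pvStepA_closed_hit [a] [b] b rfl _ _ _]
        have hlen : ((l.drop (i+1)).drop (k+1)).length ≤ n := by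
          simp only [List.length_drop] at *
          omega
        rw [ih _ hlen, pvLoopB_some_some a b l i k hfa hfb]
        simp [htk1]

lemma pvMain (a b : Char) (l : List Char) (u : List Char) (ds : List String) :
    pvFinishA (l.foldl (pvStepA [a] [b]) (0, [], u, ds)) =
      (ds ++ (pvLoopB a b l).1, u ++ (pvLoopB a b l).2) :=
  pvMainAux a b l.length l le_rfl u ds

-- repackage A's result through pvFinishA
lemma pvA_eq (line d1 d2 : String) :
    remove_delimited line d1 d2 =
      ((pvFinishA (line.toList.foldl (pvStepA d1.toList d2.toList) (0, [], [], []))).1,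
       String.ofList (pvFinishA (line.toList.foldl (pvStepA d1.toList d2.toList) (0, [], [], []))).2) := rfl

-- ===== VERDICT (by name: the statement is the Claim_ definition above) =====
theorem remove_delimited_spec : Claim_equal_remove_delimited := by
  intro line d1 d2 _hdom
  unfold Spec_remove_delimited
  rw [pvA_eq]
  unfold remove_delimited_alt
  rcases h1 : d1.toList with _ | ⟨x, _ | ⟨y, ys⟩⟩ <;>
    rcases h2 : d2.toList with _ | ⟨z, _ | ⟨w, ws⟩⟩
  -- both delimiters single characters: the main correspondence
  case cons.nil.cons.nil =>
    rw [pvMain]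
    simp
  -- d1 single but d2 not one character: the region opened by d1 never closes
  case cons.nil.nil =>
    rw [pvNoD2 [x] [] (by intro c; simp)]
    simp
  case cons.nil.cons.cons =>
    rw [pvNoD2 [x] (z :: w :: ws) (by intro c; simp)]
    simp
  -- d1 not one character: no character ever matches it, bk stays 0
  all_goals
    rw [pvNoMatch0 _ _ line.toList (by intro c _; simp)]
    simp [pvFinishA]
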